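-- pv_equiv track=rewrite | github.com/christiancasey/MdC2Unicode | MdC2Unicode.py | getSeparators
-- ===== SOURCE A (Python) =====
-- def getSeparators(s):
--     """This is where the MdC string is split up into control characters (separators)
--     and Glyphs (Gardiner sign codes or phonetic sequences)"""
--
--     vSeparators = []
--     vSepChars = '-:*&^#'
--     dPossible = { '-': ['-'], ':': [':'], '*': ['**', '*'], '#': ['##'], '&': ['&&&', '&'], '^': ['^^^']}
--     n = len(s)
--     iStart = None
--     iEnd = 0
--     i = -1
--     while i < len(s)-1:
--         i += 1
--         c = s[i]
--         if c in vSepChars: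
--
--             # Avoid the issue with the ambiguity of & in brackets: [& &]
--             if c == '&':
--                 if i > 0 and s[i-1] == '[':
--                     continue
--                 if i < n-1 and s[i+1] == ']':
--                     continue
--
--             for sPossible in dPossible[c]:
--                 k = len(sPossible)
--                 if not i+k > n:
--                     if sPossible == ''.join([ s[j] for j in range(i,i+k) ]):
--                         iStart = i
--                         if iStart > iEnd:
--                             t = (0, s[iEnd:iStart])
--                             vSeparators.append(t)
--
--                         t = (1, sPossible)
--                         vSeparators.append(t)
--                         iEnd = i+k
--                         i = i+k-1
--                         break
--     if iEnd < n:
--         t = (0, s[iEnd:])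
--         vSeparators.append(t)
--     return vSeparators
-- ===== SOURCE B (Python) =====
-- def getSeparators(s):
--     """This is where the MdC string is split up into control characters (separators)
--     and Glyphs (Gardiner sign codes or phonetic sequences)"""
--     TOKENS = ('&&&', '##', '**', '^^^', '-', ':', '*', '&')
--     n = len(s)
--     out = []
--     buf = []
--     i = 0
--     while i < n:
--         c = s[i]
--         tok = None
--         blocked = c == '&' and ((i > 0 and s[i - 1] == '[') or
--                                 (i + 1 < n and s[i + 1] == ']'))
--         if not blocked:
--             for t in TOKENS:
--                 if s.startswith(t, i):
--                     tok = t
--                     break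
--         if tok is None:
--             buf.append(c)
--             i += 1
--         else:
--             if buf:
--                 out.append((0, ''.join(buf)))
--                 buf = []
--             out.append((1, tok))
--             i += len(tok)
--     if buf:
--         out.append((0, ''.join(buf)))
--     return out
-- ===== Notes on version B (the rewrite author's own statement) =====
-- stated objective: simpler
-- what changed: Replaces A's index bookkeeping (iStart/iEnd slicing, per-char dict of candidate strings tried via a join over an index range, and in-loop index jumps) with a single flat priority token list matched by startswith at a cursor plus a character buffer that is flushed when a separator token is found.
import Mathlib
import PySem

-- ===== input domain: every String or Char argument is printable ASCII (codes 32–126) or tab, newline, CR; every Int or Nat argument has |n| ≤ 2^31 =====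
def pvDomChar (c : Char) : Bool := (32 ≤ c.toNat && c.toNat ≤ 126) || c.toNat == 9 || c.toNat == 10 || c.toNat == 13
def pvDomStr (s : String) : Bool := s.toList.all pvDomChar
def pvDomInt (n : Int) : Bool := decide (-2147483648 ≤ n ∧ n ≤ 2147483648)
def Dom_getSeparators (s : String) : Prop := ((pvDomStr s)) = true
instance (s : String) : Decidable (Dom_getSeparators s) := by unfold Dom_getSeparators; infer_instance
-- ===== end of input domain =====

-- B replaces A's index bookkeeping and per-char candidate dict with a flat priority
-- token list matched by startswith at a cursor plus a character buffer (objective: simpler).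

-- ===== PORT A =====

-- dPossible[c] (dict of literal candidate lists, keyed by the separator character)
def gsDPossible (c : Char) : List (List Char) :=
  if c = '-' then [['-']]
  else if c = ':' then [[':']]
  else if c = '*' then [['*','*'], ['*']]
  else if c = '#' then [['#','#']]
  else if c = '&' then [['&','&','&'], ['&']]
  else if c = '^' then [['^','^','^']]
  else []

-- ''.join([ s[j] for j in range(i, i+k) ])
def gsJoin (cs : List Char) (i k : Int) : List Char :=
  (PySem.List.pyRange i (i + k) 1).map (fun j => PySem.List.pyGetD cs j ' ')

-- the inner `for sPossible in dPossible[c]` trial loop: first candidate that fits and matches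
def gsFindCand (cs : List Char) (n i : Int) : List (List Char) → Option (List Char)
  | [] => none
  | p :: rest =>
      if ¬ (i + (p.length : Int) > n) then
        if p = gsJoin cs i (p.length : Int) then some p
        else gsFindCand cs n i rest
      else gsFindCand cs n i rest

-- termination helpers for the while loop (cited by decreasing_by)
theorem gsFindCand_mem {cs : List Char} {n i : Int} {ps : List (List Char)} {p : List Char}
    (h : gsFindCand cs n i ps = some p) : p ∈ ps := by
  induction ps with
  | nil => simp [gsFindCand] at h
  | cons q rest ih =>
      rw [gsFindCand] at h
      split_ifs at h
      all_goals first
        | exact List.mem_cons_of_mem _ (ih h)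
        | (injection h with h; simp [h])

theorem gsDPossible_pos {c : Char} {p : List Char} (h : p ∈ gsDPossible c) : 0 < p.length := by
  unfold gsDPossible at h
  split_ifs at h <;> simp_all <;> rcases h with h | h <;> simp [h]

-- the while loop of A: i is the last processed index, iEnd the start of the pending glyph run
def gsLoopA (cs : List Char) (n i iEnd : Int) (acc : List (Int × String)) : List (Int × String) :=
  if hlt : i < (cs.length : Int) - 1 then
    let i1 := i + 1
    let c := PySem.List.pyGetD cs i1 ' '
    if c ∈ ['-', ':', '*', '&', '^', '#'] then
      if c = '&' ∧ (i1 > 0 ∧ PySem.List.pyGetD cs (i1 - 1) ' ' = '[') then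
        gsLoopA cs n i1 iEnd acc
      else if c = '&' ∧ (i1 < n - 1 ∧ PySem.List.pyGetD cs (i1 + 1) ' ' = ']') then
        gsLoopA cs n i1 iEnd acc
      else
        match hfc : gsFindCand cs n i1 (gsDPossible c) with
        | none => gsLoopA cs n i1 iEnd acc
        | some p =>
            let k : Int := (p.length : Int)
            let acc1 := if i1 > iEnd then
                acc ++ [((0 : Int), String.ofList (PySem.List.slice cs (some iEnd) (some i1)))]
              else acc
            gsLoopA cs n (i1 + k - 1) (i1 + k) (acc1 ++ [((1 : Int), String.ofList p)])
    else gsLoopA cs n i1 iEnd acc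
  else
    if iEnd < n then acc ++ [((0 : Int), String.ofList (PySem.List.slice cs (some iEnd) none))] else acc
termination_by ((cs.length : Int) - i).toNat
decreasing_by
  · omega
  · omega
  · omega
  · have hp : 0 < p.length := gsDPossible_pos (gsFindCand_mem hfc)
    omega
  · omega

def getSeparators (s : String) : List (Int × String) :=
  gsLoopA s.toList (PySem.Str.len s) (-1) 0 []

-- ===== PORT B =====

-- TOKENS, in priority order
def gsTokens : List (List Char) :=
  [['&','&','&'], ['#','#'], ['*','*'], ['^','^','^'], ['-'], [':'], ['*'], ['&']]

-- the `for t in TOKENS: if s.startswith(t, i)` scan; s.startswith(t, i) with 0 ≤ i ≤ n is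
-- exactly `t.isPrefixOf (cs.drop i)`
def gsFindTok (rest : List Char) : List (List Char) → Option (List Char)
  | [] => none
  | t :: ts => if t.isPrefixOf rest then some t else gsFindTok rest ts

theorem gsFindTok_mem {rest : List Char} {ps : List (List Char)} {t : List Char}
    (h : gsFindTok rest ps = some t) : t ∈ ps := by
  induction ps with
  | nil => simp [gsFindTok] at h
  | cons q rest' ih =>
      rw [gsFindTok] at h
      split_ifs at h
      all_goals first
        | exact List.mem_cons_of_mem _ (ih h)
        | (injection h with h; simp [h])

theorem gsTokens_pos {t : List Char} (h : t ∈ gsTokens) : 0 < t.length := by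
  fin_cases h <;> decide

-- B's while loop: cursor i, pending glyph characters in buf
def gsLoopB (cs : List Char) (n i : Nat) (buf : List Char) (out : List (Int × String)) :
    List (Int × String) :=
  if hlt : i < n then
    let c := cs.getD i ' '
    let blocked : Bool := c == '&' &&
      ((decide (0 < i) && (cs.getD (i - 1) ' ' == '[')) ||
       (decide (i + 1 < n) && (cs.getD (i + 1) ' ' == ']')))
    match htk : (if blocked then none else gsFindTok (cs.drop i) gsTokens) with
    | none => gsLoopB cs n (i + 1) (buf ++ [c]) out
    | some t =>
        let out1 := if buf ≠ [] then out ++ [((0 : Int), String.ofList buf)] else out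
        gsLoopB cs n (i + t.length) [] (out1 ++ [((1 : Int), String.ofList t)])
  else
    if buf ≠ [] then out ++ [((0 : Int), String.ofList buf)] else out
termination_by n - i
decreasing_by
  · omega
  · have ht : 0 < t.length := by
      split_ifs at htk
      all_goals first
        | exact gsTokens_pos (gsFindTok_mem htk)
        | simp at htk
    omega

def getSeparators_alt (s : String) : List (Int × String) :=
  gsLoopB s.toList s.toList.length 0 [] []

-- ===== PRECONDITION & SPEC =====
def Spec_getSeparators (s : String) (out : List (Int × String)) : Prop := out = getSeparators_alt s
instance (s : String) (out : List (Int × String)) : Decidable (Spec_getSeparators s out) := by unfold Spec_getSeparators; infer_instance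

-- ===== CLAIM (what is proved, stated in full; the proofs are below) =====
def Claim_equal_getSeparators : Prop := ∀ (s : String), Dom_getSeparators s → Spec_getSeparators s (getSeparators s)

-- ===== LEMMAS AND PROOFS =====

-- proof-only helpers: one step of each loop, factored out

def stepA (cs : List Char) (i1 : Int) : Option (List Char) :=
  if PySem.List.pyGetD cs i1 ' ' ∈ ['-', ':', '*', '&', '^', '#'] then
    if PySem.List.pyGetD cs i1 ' ' = '&' ∧ (i1 > 0 ∧ PySem.List.pyGetD cs (i1 - 1) ' ' = '[') then
      none
    else if PySem.List.pyGetD cs i1 ' ' = '&' ∧ (i1 < (cs.length : Int) - 1 ∧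
        PySem.List.pyGetD cs (i1 + 1) ' ' = ']') then
      none
    else gsFindCand cs (cs.length : Int) i1 (gsDPossible (PySem.List.pyGetD cs i1 ' '))
  else none

def stepB (cs : List Char) (i : Nat) : Option (List Char) :=
  if (cs.getD i ' ' == '&' && ((decide (0 < i) && (cs.getD (i - 1) ' ' == '[')) ||
       (decide (i + 1 < cs.length) && (cs.getD (i + 1) ' ' == ']')))) then none
  else gsFindTok (cs.drop i) gsTokens

theorem loopA_step (cs : List Char) (i e : Int) (acc : List (Int × String))
    (hg : i < (cs.length : Int) - 1) :
    gsLoopA cs (cs.length : Int) i e acc =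
      match stepA cs (i + 1) with
      | none => gsLoopA cs (cs.length : Int) (i + 1) e acc
      | some p => gsLoopA cs (cs.length : Int) (i + 1 + (p.length : Int) - 1)
          (i + 1 + (p.length : Int))
          ((if i + 1 > e then
              acc ++ [((0 : Int), String.ofList (PySem.List.slice cs (some e) (some (i + 1))))]
            else acc) ++ [((1 : Int), String.ofList p)]) := by
  rw [gsLoopA.eq_def, dif_pos hg]
  unfold stepA
  by_cases hc : PySem.List.pyGetD cs (i + 1) ' ' ∈ ['-', ':', '*', '&', '^', '#']
  · simp only [if_pos hc]
    by_cases hb1 : PySem.List.pyGetD cs (i + 1) ' ' = '&' ∧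
        (i + 1 > 0 ∧ PySem.List.pyGetD cs (i + 1 - 1) ' ' = '[')
    · simp only [if_pos hb1]
    · simp only [if_neg hb1]
      by_cases hb2 : PySem.List.pyGetD cs (i + 1) ' ' = '&' ∧
          (i + 1 < (cs.length : Int) - 1 ∧ PySem.List.pyGetD cs (i + 1 + 1) ' ' = ']')
      · simp only [if_pos hb2]
      · simp only [if_neg hb2]
        split
        · rename_i heq
          rw [heq]
        · rename_i p heq
          rw [heq]
  · simp only [if_neg hc]

theorem loopB_step (cs : List Char) (j : Nat) (buf : List Char) (out : List (Int × String))
    (hj : j < cs.length) :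
    gsLoopB cs cs.length j buf out =
      match stepB cs j with
      | none => gsLoopB cs cs.length (j + 1) (buf ++ [cs.getD j ' ']) out
      | some t => gsLoopB cs cs.length (j + t.length) []
          ((if buf ≠ [] then out ++ [((0 : Int), String.ofList buf)] else out)
            ++ [((1 : Int), String.ofList t)]) := by
  rw [gsLoopB.eq_def, dif_pos hj]
  unfold stepB
  by_cases hb : (cs.getD j ' ' == '&' && ((decide (0 < j) && (cs.getD (j - 1) ' ' == '[')) ||
       (decide (j + 1 < cs.length) && (cs.getD (j + 1) ' ' == ']')))) = true
  · simp only [hb, if_true]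
    split
    · rfl
    · rename_i t heq
      rw [if_pos hb] at heq
      simp at heq
  · simp only [Bool.not_eq_true] at hb
    simp only [hb, Bool.false_eq_true, if_false]
    split
    · rename_i heq
      simp only [hb, Bool.false_eq_true, if_false] at heq
      rw [heq]
    · rename_i t heq
      simp only [hb, Bool.false_eq_true, if_false] at heq
      rw [heq]

-- ''.join([s[j] for j in range(i, i+k)]) is take k of drop i when i+k ≤ len
theorem join_eq (cs : List Char) (j k : Nat) (h : j + k ≤ cs.length) :
    gsJoin cs (j : Int) (k : Int) = (cs.drop j).take k := by
  induction k with
  | zero => simp [gsJoin, PySem.List.pyRange_one_eq_nil]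
  | succ k ih =>
      have hk : j + k ≤ cs.length := by omega
      have hjk : j + k < cs.length := by omega
      have ih' := ih hk
      have h2 : (j : Int) + ((k + 1 : Nat) : Int) = ((j : Int) + (k : Int)) + 1 := by
        push_cast; ring
      have hle : (j : Int) ≤ (j : Int) + (k : Int) := by omega
      unfold gsJoin at ih' ⊢
      rw [h2, PySem.List.pyRange_one_succ_right hle, List.map_append, ih']
      have hget : PySem.List.pyGetD cs ((j : Int) + (k : Int)) ' ' = cs[j + k] := by
        have hcast : (j : Int) + (k : Int) = ((j + k : Nat) : Int) := by push_cast; ring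
        rw [hcast, PySem.List.pyGetD_natCast]
        exact List.getD_eq_getElem _ _ hjk
      simp only [List.map_cons, List.map_nil, hget]
      rw [List.take_succ]
      have hopt : (cs.drop j)[k]? = some cs[j + k] := by
        rw [List.getElem?_drop]
        exact List.getElem?_eq_getElem (by omega)
      rw [hopt]
      rfl

-- A's candidate test (fits and equals the joined range) is exactly a prefix test on the suffix
theorem cand_iff (cs : List Char) (j : Nat) (p : List Char) (hj : j ≤ cs.length) :
    p.isPrefixOf (cs.drop j) ↔
      (¬ ((j : Int) + (p.length : Int) > (cs.length : Int)) ∧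
        p = gsJoin cs (j : Int) (p.length : Int)) := by
  rw [List.isPrefixOf_iff_prefix, List.prefix_iff_eq_take]
  constructor
  · intro hp
    have hlen : p.length ≤ (cs.drop j).length := by
      conv_lhs => rw [hp]
      simp
    rw [List.length_drop] at hlen
    have hb : j + p.length ≤ cs.length := by omega
    refine ⟨by push_cast; omega, ?_⟩
    rw [join_eq cs j p.length hb, ← hp]
  · rintro ⟨hb, hp⟩
    have hb' : j + p.length ≤ cs.length := by
      have h2 : (j : Int) + (p.length : Int) ≤ (cs.length : Int) := by omega
      exact_mod_cast h2
    rw [join_eq cs j p.length hb'] at hp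
    exact hp

theorem find_eq (cs : List Char) (j : Nat) (hj : j ≤ cs.length) (ps : List (List Char)) :
    gsFindCand cs (cs.length : Int) (j : Int) ps = gsFindTok (cs.drop j) ps := by
  induction ps with
  | nil => rfl
  | cons p rest ih =>
      rw [gsFindCand, gsFindTok]
      by_cases hp : p.isPrefixOf (cs.drop j)
      · obtain ⟨hb, hq⟩ := (cand_iff cs j p hj).1 hp
        rw [if_pos hb, if_pos hq, if_pos hp]
      · rw [if_neg hp]
        by_cases hb : ¬ ((j : Int) + (p.length : Int) > (cs.length : Int))
        · have hne : ¬ p = gsJoin cs (j : Int) (p.length : Int) := fun hq =>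
            hp ((cand_iff cs j p hj).2 ⟨hb, hq⟩)
          rw [if_pos hb, if_neg hne, ih]
        · rw [if_neg hb, ih]

theorem gsFindTok_prefix {rest : List Char} {ps : List (List Char)} {t : List Char}
    (h : gsFindTok rest ps = some t) : t.isPrefixOf rest := by
  induction ps with
  | nil => simp [gsFindTok] at h
  | cons q qs ih =>
      rw [gsFindTok] at h
      split_ifs at h with hq
      · injection h with h; exact h ▸ hq
      · exact ih h

theorem stepB_some {cs : List Char} {j : Nat} {t : List Char}
    (h : stepB cs j = some t) : gsFindTok (cs.drop j) gsTokens = some t := by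
  unfold stepB at h
  split_ifs at h
  · exact h

set_option maxRecDepth 8192 in
theorem stepA_eq_stepB (cs : List Char) (j : Nat) (hj : j < cs.length) :
    stepA cs (j : Int) = stepB cs j := by
  have hget : PySem.List.pyGetD cs (j : Int) ' ' = cs.getD j ' ' := by
    rw [PySem.List.pyGetD_natCast]
  have hget1 : 0 < j → PySem.List.pyGetD cs ((j : Int) - 1) ' ' = cs.getD (j - 1) ' ' := by
    intro h0
    have hcast : (j : Int) - 1 = ((j - 1 : Nat) : Int) := by omega
    rw [hcast, PySem.List.pyGetD_natCast]
  have hget2 : PySem.List.pyGetD cs ((j : Int) + 1) ' ' = cs.getD (j + 1) ' ' := by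
    have hcast : (j : Int) + 1 = ((j + 1 : Nat) : Int) := by push_cast; ring
    rw [hcast, PySem.List.pyGetD_natCast]
  have hdrop : cs.drop j = cs.getD j ' ' :: cs.drop (j + 1) := by
    rw [List.getD_eq_getElem _ _ hj]
    exact List.drop_eq_getElem_cons hj
  unfold stepA stepB
  rw [hget, find_eq cs j (le_of_lt hj)]
  set c := cs.getD j ' ' with hc
  by_cases hAmp : c = '&'
  · -- '&': the bracket guards line up, then tokens '&&&','&' in both scans
    by_cases hb1 : 0 < j ∧ cs.getD (j - 1) ' ' = '['
    · rw [if_pos (by simp [hAmp]), if_pos ?_, if_pos (by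
        simp only [Bool.and_eq_true, Bool.or_eq_true, decide_eq_true_eq, beq_iff_eq]
        exact ⟨hAmp, Or.inl ⟨hb1.1, hb1.2⟩⟩)]
      refine ⟨hAmp, by exact_mod_cast hb1.1, ?_⟩
      rw [hget1 hb1.1]; exact hb1.2
    · by_cases hb2 : j + 1 < cs.length ∧ cs.getD (j + 1) ' ' = ']'
      · rw [if_pos (by simp [hAmp]), if_neg ?_, if_pos ?_, if_pos (by
            simp only [Bool.and_eq_true, Bool.or_eq_true, decide_eq_true_eq, beq_iff_eq]
            exact ⟨hAmp, Or.inr ⟨hb2.1, hb2.2⟩⟩)]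
        · exact ⟨hAmp, by push_cast; omega, by rw [hget2]; exact hb2.2⟩
        · rintro ⟨-, hj0, hbr⟩
          rw [hget1 (by exact_mod_cast hj0)] at hbr
          exact hb1 ⟨by exact_mod_cast hj0, hbr⟩
      · have hnb : ¬ (c == '&' && ((decide (0 < j) && (cs.getD (j - 1) ' ' == '[')) ||
            (decide (j + 1 < cs.length) && (cs.getD (j + 1) ' ' == ']')))) = true := by
          simp only [Bool.and_eq_true, Bool.or_eq_true, decide_eq_true_eq, beq_iff_eq]
          rintro ⟨-, h | h⟩
          · exact hb1 h
          · exact hb2 h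
        rw [if_pos (by simp [hAmp]), if_neg ?_, if_neg ?_, if_neg hnb]
        · rw [hAmp, hdrop]
          simp [gsDPossible, gsTokens, gsFindTok, List.isPrefixOf, hAmp]
        · rintro ⟨-, hjl, hbr⟩
          rw [hget2] at hbr
          exact hb2 ⟨by exact_mod_cast (by omega : (j : Int) + 1 < (cs.length : Int)), hbr⟩
        · rintro ⟨-, hj0, hbr⟩
          rw [hget1 (by exact_mod_cast hj0)] at hbr
          exact hb1 ⟨by exact_mod_cast hj0, hbr⟩
  · -- all other characters: no bracket guard on either side
    have hnb : ¬ (c == '&' && ((decide (0 < j) && (cs.getD (j - 1) ' ' == '[')) ||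
        (decide (j + 1 < cs.length) && (cs.getD (j + 1) ' ' == ']')))) = true := by
      simp [hAmp]
    rw [if_neg hnb]
    have hB1 : ¬ (c = '&' ∧ ((j : Int) > 0 ∧ PySem.List.pyGetD cs ((j : Int) - 1) ' ' = '[')) :=
      fun h => hAmp h.1
    have hB2 : ¬ (c = '&' ∧ ((j : Int) < (cs.length : Int) - 1 ∧
        PySem.List.pyGetD cs ((j : Int) + 1) ' ' = ']')) := fun h => hAmp h.1
    by_cases h1 : c = '-'
    · rw [if_pos (by simp [h1]), if_neg hB1, if_neg hB2, h1, hdrop]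
      simp [gsDPossible, gsTokens, gsFindTok, List.isPrefixOf, h1]
    · by_cases h2 : c = ':'
      · rw [if_pos (by simp [h2]), if_neg hB1, if_neg hB2, h2, hdrop]
        simp [gsDPossible, gsTokens, gsFindTok, List.isPrefixOf, h2]
      · by_cases h3 : c = '*'
        · rw [if_pos (by simp [h3]), if_neg hB1, if_neg hB2, h3, hdrop]
          simp [gsDPossible, gsTokens, gsFindTok, List.isPrefixOf, h3]
        · by_cases h4 : c = '^'
          · rw [if_pos (by simp [h4]), if_neg hB1, if_neg hB2, h4, hdrop]
            simp [gsDPossible, gsTokens, gsFindTok, List.isPrefixOf, h4]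
          · by_cases h5 : c = '#'
            · rw [if_pos (by simp [h5]), if_neg hB1, if_neg hB2, h5, hdrop]
              simp [gsDPossible, gsTokens, gsFindTok, List.isPrefixOf, h5]
            · have b1 : ('-' == c) = false := beq_eq_false_iff_ne.mpr (Ne.symm h1)
              have b2 : ((':' : Char) == c) = false := beq_eq_false_iff_ne.mpr (Ne.symm h2)
              have b3 : (('*' : Char) == c) = false := beq_eq_false_iff_ne.mpr (Ne.symm h3)
              have b4 : (('^' : Char) == c) = false := beq_eq_false_iff_ne.mpr (Ne.symm h4)
              have b5 : (('#' : Char) == c) = false := beq_eq_false_iff_ne.mpr (Ne.symm h5)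
              have b6 : (('&' : Char) == c) = false := beq_eq_false_iff_ne.mpr (Ne.symm hAmp)
              rw [if_neg (by simp [h1, h2, h3, h4, h5, hAmp]), hdrop]
              simp [gsTokens, gsFindTok, List.isPrefixOf, b1, b2, b3, b4, b5, b6]

theorem loop_eq (cs : List Char) (j e : Nat) (acc : List (Int × String))
    (he : e ≤ j) (hj : j ≤ cs.length) :
    gsLoopA cs (cs.length : Int) ((j : Int) - 1) (e : Int) acc
      = gsLoopB cs cs.length j ((cs.drop e).take (j - e)) acc := by
  by_cases hlt : j < cs.length
  · have hcJ : (j : Int) < (cs.length : Int) := by exact_mod_cast hlt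
    have hA := loopA_step cs ((j : Int) - 1) (e : Int) acc (by omega)
    rw [show (j : Int) - 1 + 1 = (j : Int) by ring] at hA
    rw [hA, loopB_step cs j _ acc hlt, stepA_eq_stepB cs j hlt]
    cases hstep : stepB cs j with
    | none =>
        have hrec := loop_eq cs (j + 1) e acc (by omega) (by omega)
        rw [show ((j + 1 : Nat) : Int) - 1 = (j : Int) by push_cast; ring] at hrec
        have hbuf : (cs.drop e).take (j + 1 - e) =
            (cs.drop e).take (j - e) ++ [cs.getD j ' '] := by
          rw [show j + 1 - e = (j - e) + 1 by omega, List.take_succ]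
          have hopt : (cs.drop e)[j - e]? = some cs[j] := by
            rw [List.getElem?_drop, show e + (j - e) = j by omega]
            exact List.getElem?_eq_getElem hlt
          rw [hopt, List.getD_eq_getElem _ _ hlt]
          rfl
        rw [hbuf] at hrec
        exact hrec
    | some t =>
        have hpre := gsFindTok_prefix (stepB_some hstep)
        have htpos : 0 < t.length := gsTokens_pos (gsFindTok_mem (stepB_some hstep))
        have hlen : j + t.length ≤ cs.length := by
          have h2 := List.IsPrefix.length_le (List.isPrefixOf_iff_prefix.1 hpre)
          rw [List.length_drop] at h2
          omega
        have hrec := loop_eq cs (j + t.length) (j + t.length) ((if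
            (cs.drop e).take (j - e) ≠ [] then
            acc ++ [((0 : Int), String.ofList ((cs.drop e).take (j - e)))] else acc)
            ++ [((1 : Int), String.ofList t)]) (le_refl _) hlen
        rw [show ((j + t.length : Nat) : Int) - 1 = (j : Int) + (t.length : Int) - 1 by
          push_cast; ring] at hrec
        rw [show ((j + t.length : Nat) : Int) = (j : Int) + (t.length : Int) by push_cast; ring] at hrec
        simp only [Nat.sub_self, List.take_zero] at hrec
        have hacc : (if (j : Int) > (e : Int) then
            acc ++ [((0 : Int), String.ofList (PySem.List.slice cs (some (e : Int))
              (some (j : Int))))] else acc)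
            = (if (cs.drop e).take (j - e) ≠ [] then
                acc ++ [((0 : Int), String.ofList ((cs.drop e).take (j - e)))] else acc) := by
          by_cases hej : e < j
          · rw [if_pos (by exact_mod_cast hej), if_pos ?_, PySem.List.slice_natCast]
            have hlen2 : ((cs.drop e).take (j - e)).length = j - e := by
              rw [List.length_take, List.length_drop]
              omega
            intro hnil
            rw [hnil] at hlen2
            simp at hlen2
            omega
          · have hej' : e = j := by omega
            subst hej'
            rw [if_neg (by omega), if_neg (by simp)]
        rw [hacc]
        exact hrec
  · have hje : j = cs.length := by omega
    subst hje
    rw [gsLoopA.eq_def, dif_neg (by omega : ¬ ((cs.length : Int) - 1 < (cs.length : Int) - 1))]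
    rw [gsLoopB.eq_def, dif_neg (lt_irrefl _)]
    have hbuf : (cs.drop e).take (cs.length - e) = cs.drop e :=
      List.take_of_length_le (by rw [List.length_drop])
    rw [hbuf]
    by_cases hel : e < cs.length
    · rw [if_pos (by exact_mod_cast hel), if_pos (by simp [List.drop_eq_nil_iff]; omega),
        PySem.List.slice_from_natCast]
    · rw [if_neg (by exact_mod_cast hel), if_neg (by simp [List.drop_eq_nil_iff]; omega)]
termination_by cs.length - j
decreasing_by
  · omega
  · omega

theorem getSeparators_spec : Claim_equal_getSeparators := by
  intro s _
  unfold Spec_getSeparators getSeparators getSeparators_alt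
  have h := loop_eq s.toList 0 0 [] (Nat.le_refl 0) (Nat.zero_le _)
  rw [PySem.Str.len_eq]
  simpa using h
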